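-- pv_equiv track=rewrite | github.com/Cleankz/transformationx2 | trans.py | TransformTransform
-- ===== SOURCE A (Python) =====
-- def step_to_transform(array):
--     B = []
--     flag = True
--     for i in range(len(array)-1):
--         for j in range(len(array)-1-i):
--             k = i + j
--             if k == j:
--                 max = array[0]
--             else:
--                 max = 0
--             for x in array[j:k]:
--                 if max <= x:
--                     max = x
--             B.append(max)
--     return B
--
-- def TransformTransform(A,N):
--     step_1 = step_to_transform(A)
--     step_2 = step_to_transform(step_1)
--     summ = 0
--     for i in range(len(step_2)):
--         summ += step_2[i]
--
--     if summ % 2 ==0: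
--         return True
--     else:
--         return False
-- ===== SOURCE B (Python) =====
-- def step_to_transform(array):
--     # row-extension DP: row i holds max(0, max(array[j:j+i])) for each j,
--     # extended from row i-1 in O(1) per entry instead of rescanning the slice
--     n = len(array)
--     if n < 2:
--         return []
--     out = [array[0]] * (n - 1)
--     row = []
--     for i in range(1, n - 1):
--         if i == 1:
--             row = [x if x > 0 else 0 for x in array[: n - 2]]
--         else:
--             row = [max(row[j], array[j + i - 1]) for j in range(n - 1 - i)]
--         out += row
--     return out
--
-- def TransformTransform(A, N):
--     return sum(step_to_transform(step_to_transform(A))) % 2 == 0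
-- ===== Notes on version B (the rewrite author's own statement) =====
-- stated objective: faster
-- what changed: Replaces the cubic per-step rescan of every slice with a row-extension dynamic program: row i of range-maxima is built from row i-1 in O(1) per entry, so each step costs O(output) instead of O(m^3), and the parity is taken of a plain sum.
import Mathlib
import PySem

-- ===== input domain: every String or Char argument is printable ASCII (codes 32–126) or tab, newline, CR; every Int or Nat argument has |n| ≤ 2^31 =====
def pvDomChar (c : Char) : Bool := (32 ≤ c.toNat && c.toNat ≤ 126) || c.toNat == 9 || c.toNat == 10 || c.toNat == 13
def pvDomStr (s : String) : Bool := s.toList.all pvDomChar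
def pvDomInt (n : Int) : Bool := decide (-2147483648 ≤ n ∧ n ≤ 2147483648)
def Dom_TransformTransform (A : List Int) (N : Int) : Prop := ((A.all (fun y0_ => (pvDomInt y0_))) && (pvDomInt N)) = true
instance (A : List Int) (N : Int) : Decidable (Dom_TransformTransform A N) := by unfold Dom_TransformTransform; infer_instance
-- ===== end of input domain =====

-- B replaces A's per-slice rescans by a row-extension dynamic program (each row of
-- range-maxima is built from the previous row); same return value.

-- ===== PORT A =====
-- literal port of step_to_transform: triple nested loops, rescanning array[j:k] each time
def stepA (array : List Int) : List Int :=
  (PySem.List.pyRange 0 (PySem.List.len array - 1) 1).foldl (fun B i =>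
    (PySem.List.pyRange 0 (PySem.List.len array - 1 - i) 1).foldl (fun B j =>
      let k := i + j
      -- array[0] : only evaluated when the loops run, i.e. len array ≥ 2, so the default is never used
      let m0 : Int := if k = j then PySem.List.pyGetD array 0 0 else 0
      let m := (PySem.List.slice array (some j) (some k)).foldl
        (fun m x => if m ≤ x then x else m) m0
      B ++ [m]) B) []

def TransformTransform (A : List Int) (N : Int) : Bool :=
  let step1 := stepA A
  let step2 := stepA step1
  let summ := (PySem.List.pyRange 0 (PySem.List.len step2) 1).foldl
    (fun s i => s + PySem.List.pyGetD step2 i 0) 0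
  if PySem.Int.mod summ 2 = 0 then true else false

-- ===== PORT B =====
-- port of Source B's step_to_transform: row i computed from row i-1, rows appended to out
def stepB (array : List Int) : List Int :=
  let n := PySem.List.len array
  if n < 2 then []
  else
    -- [array[0]] * (n-1) ; array[0] exists since n ≥ 2, so the default is never used
    let out := List.replicate (n - 1).toNat (PySem.List.pyGetD array 0 0)
    let p := (PySem.List.pyRange 1 (n - 1) 1).foldl
      (fun (p : List Int × List Int) i =>
        let row' := if i = 1 then
            (PySem.List.slice array none (some (n - 2))).map (fun x => if x > 0 then x else 0)
          else
            (PySem.List.pyRange 0 (n - 1 - i) 1).map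
              (fun j => max (PySem.List.pyGetD p.2 j 0) (PySem.List.pyGetD array (j + i - 1) 0))
        (p.1 ++ row', row')) (out, [])
    p.1

def TransformTransform_alt (A : List Int) (N : Int) : Bool :=
  PySem.Int.mod (stepB (stepB A)).sum 2 = 0

-- ===== PRECONDITION & SPEC =====
def Spec_TransformTransform (A : List Int) (N : Int) (out : Bool) : Prop := out = TransformTransform_alt A N
instance (A : List Int) (N : Int) (out : Bool) : Decidable (Spec_TransformTransform A N out) := by unfold Spec_TransformTransform; infer_instance

-- ===== CLAIM (what is proved, stated in full; the proofs are below) =====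
def Claim_equal_TransformTransform : Prop := ∀ (A : List Int) (N : Int), Dom_TransformTransform A N → Spec_TransformTransform A N (TransformTransform A N)

-- ===== LEMMAS AND PROOFS =====

-- the value A's inner loop appends for (i, j), indexed by Nats
def canonVal (a : List Int) (i j : Nat) : Int :=
  if i = 0 then a.getD 0 0 else ((a.drop j).take i).foldl max 0

-- the common normal form of one transformation step
def canon (a : List Int) : List Int :=
  (List.range (a.length - 1)).flatMap
    (fun i => (List.range (a.length - 1 - i)).map (fun j => canonVal a i j))

-- B's row i: the range-maxima of all width-i windows (clamped at 0)
def rowV (a : List Int) (i : Nat) : List Int :=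
  (List.range (a.length - 1 - i)).map (fun j => ((a.drop j).take i).foldl max 0)

lemma tns1 (n : Nat) : ((n:Int) - 1).toNat = n - 1 := by omega

lemma tns2 (n k : Nat) : ((n:Int) - 1 - (k:Int)).toNat = n - 1 - k := by omega

-- A's scan step is max
lemma ite_max (m x : Int) : (if m ≤ x then x else m) = max m x := (max_def m x).symm

-- A's inner loop value equals canonVal
lemma valA (a : List Int) (k j : Nat) :
    (PySem.List.slice a (some (j:Int)) (some ((k:Int) + (j:Int)))).foldl
      (fun m x => if m ≤ x then x else m)
      (if (k:Int) + (j:Int) = (j:Int) then PySem.List.pyGetD a 0 0 else 0) = canonVal a k j := by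
  have hs : PySem.List.slice a (some (j:Int)) (some ((k:Int) + (j:Int)))
      = (a.drop j).take k := by
    rw [add_comm, PySem.List.slice_natCast_add]
  rw [hs]
  by_cases hk : k = 0
  · subst hk; simp [canonVal, PySem.List.pyGetD_zero]
  · have : ¬ ((k:Int) + (j:Int) = (j:Int)) := by omega
    simp only [this, if_false, canonVal, hk, ite_max]

lemma stepA_eq_canon (a : List Int) : stepA a = canon a := by
  unfold stepA canon
  simp only [PySem.List.len_eq, PySem.List.pyRange_one, zero_add, sub_zero, tns1, tns2,
    List.foldl_map, PySem.List.foldl_append_singleton_eq_map,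
    PySem.List.foldl_append_eq_flatMap, List.nil_append]
  apply List.flatMap_congr
  intro k _
  apply List.map_congr_left
  intro j _
  exact valA a k j

-- B's first row (the clamp map over array[:n-2]) is the width-1 row of maxima
lemma row1_eq (a : List Int) (m : Nat) (hm : m ≤ a.length) :
    (a.take m).map (fun x => if x > 0 then x else 0)
      = (List.range m).map (fun j => ((a.drop j).take 1).foldl max 0) := by
  apply List.ext_getElem
  · simp [Nat.min_eq_left hm]
  · intro j h1 h2
    simp only [List.length_map, List.length_take, List.length_range] at h1 h2
    have hj : j < a.length := lt_of_lt_of_le h2 hm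
    have hdrop : a.drop j = a[j] :: a.drop (j+1) := List.drop_eq_getElem_cons hj
    simp only [List.getElem_map, List.getElem_take, List.getElem_range, hdrop,
      List.take_succ_cons, List.take_zero, List.foldl_cons, List.foldl_nil]
    rw [max_def]
    split <;> split <;> omega

-- extending a width-t window by one element on the right
lemma window_succ (a : List Int) (j t : Nat) (h : j + t < a.length) :
    ((a.drop j).take (t+1)).foldl max 0
      = max (((a.drop j).take t).foldl max 0) (a.getD (j+t) 0) := by
  have hlt : t < (a.drop j).length := by simp [List.length_drop]; omega
  have : (a.drop j).take (t+1) = (a.drop j).take t ++ [(a.drop j)[t]] := by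
    rw [List.take_add_one]
    simp [List.getElem?_eq_getElem hlt]
  rw [this, List.foldl_append]
  simp [List.getElem_drop, h]

-- B's row update (the i ≠ 1 branch) turns row t into row t+1
lemma rowstep (a : List Int) (t : Nat) :
    (PySem.List.pyRange 0 ((a.length:Int) - 1 - (1 + (t:Int))) 1).map
        (fun j => max (PySem.List.pyGetD (rowV a t) j 0)
                      (PySem.List.pyGetD a (j + (1+(t:Int)) - 1) 0))
      = rowV a (t+1) := by
  have htn : ((a.length:Int) - 1 - (1 + (t:Int)) - 0).toNat = a.length - 2 - t := by omega
  rw [PySem.List.pyRange_one, List.map_map, htn]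
  have hlen : a.length - 1 - (t+1) = a.length - 2 - t := by omega
  unfold rowV
  rw [hlen]
  apply List.map_congr_left
  intro j hj
  simp only [List.mem_range] at hj
  have e2 : ((0:Int) + (j:Int)) = ((j:Nat):Int) := by ring
  simp only [Function.comp_apply, e2, PySem.List.pyGetD_natCast]
  have e1 : (j:Int) + (1 + (t:Int)) - 1 = ((j+t : Nat) : Int) := by push_cast; ring
  rw [e1, PySem.List.pyGetD_natCast]
  have hjlen : j < (List.map (fun j => List.foldl max 0 (List.take t (List.drop j a)))
      (List.range (a.length - 1 - t))).length := by simp; omega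
  rw [List.getD_eq_getElem _ _ hjlen]
  simp only [List.getElem_map, List.getElem_range]
  rw [window_succ a j t (by omega)]

-- invariant of B's fold: out carries rows 1..t, the state carries row t
lemma loop_inv (a : List Int) (out0 : List Int) (hN : 2 ≤ a.length) (t : Nat) :
    (List.range t).foldl (fun (p : List Int × List Int) (k : Nat) =>
        (fun (i : Int) =>
          (p.1 ++ (if i = 1 then
              (PySem.List.slice a none (some ((a.length:Int) - 2))).map (fun x => if x > 0 then x else 0)
            else
              (PySem.List.pyRange 0 ((a.length:Int) - 1 - i) 1).map
                (fun j => max (PySem.List.pyGetD p.2 j 0) (PySem.List.pyGetD a (j + i - 1) 0))),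
           (if i = 1 then
              (PySem.List.slice a none (some ((a.length:Int) - 2))).map (fun x => if x > 0 then x else 0)
            else
              (PySem.List.pyRange 0 ((a.length:Int) - 1 - i) 1).map
                (fun j => max (PySem.List.pyGetD p.2 j 0) (PySem.List.pyGetD a (j + i - 1) 0)))))
          (1 + (k:Int))) (out0, [])
      = (out0 ++ (List.range t).flatMap (fun s => rowV a (s+1)),
         if t = 0 then [] else rowV a t) := by
  induction t with
  | zero => simp
  | succ t ih =>
    rw [List.range_succ, List.foldl_append, ih]
    simp only [List.foldl_cons, List.foldl_nil]
    by_cases h0 : t = 0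
    · subst h0
      have hsl : PySem.List.slice a none (some ((a.length:Int) - 2)) = a.take (a.length - 2) := by
        have : ((a.length:Int) - 2) = ((a.length - 2 : Nat) : Int) := by omega
        rw [this, PySem.List.slice_to_natCast]
      simp only [Nat.cast_zero, add_zero]
      rw [hsl, row1_eq a _ (by omega)]
      have : a.length - 1 - 1 = a.length - 2 := by omega
      simp [rowV, this]
    · have hne : ¬ ((1:Int) + (t:Int) = 1) := by omega
      simp only [if_neg h0, hne, if_false]
      rw [rowstep a t, List.flatMap_append]
      simp

lemma stepB_eq_canon (a : List Int) : stepB a = canon a := by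
  unfold stepB
  simp only [PySem.List.len_eq]
  by_cases h2 : (a.length : Int) < 2
  · rw [if_pos h2]
    have : a.length - 1 = 0 := by omega
    simp [canon, this]
  · rw [if_neg h2]
    have hN : 2 ≤ a.length := by omega
    have htn : ((a.length:Int) - 1 - 1).toNat = a.length - 2 := by omega
    rw [PySem.List.pyRange_one, htn, List.foldl_map]
    have h := congrArg Prod.fst
      (loop_inv a (List.replicate (((a.length:Int) - 1)).toNat (PySem.List.pyGetD a 0 0)) hN
        (a.length - 2))
    refine Eq.trans h ?_
    dsimp only
    unfold canon
    have hr : a.length - 1 = (a.length - 2) + 1 := by omega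
    rw [hr, List.range_succ_eq_map, List.flatMap_cons, List.flatMap_map]
    congr 1
    · have e : ((a.length:Int) - 1).toNat = a.length - 2 + 1 := by omega
      rw [e, PySem.List.pyGetD_zero]
      simp [canonVal, List.map_const']
    · apply List.flatMap_congr
      intro s _
      have hl : a.length - 2 + 1 - (s + 1) = a.length - 1 - (s + 1) := by omega
      simp [rowV, canonVal, hl]

lemma stepA_eq_stepB (a : List Int) : stepA a = stepB a := by
  rw [stepA_eq_canon, stepB_eq_canon]

-- ===== VERDICT (by name: the statement is the Claim_ definition above) =====
theorem TransformTransform_spec : Claim_equal_TransformTransform := by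
  intro A N _
  unfold Spec_TransformTransform TransformTransform TransformTransform_alt
  simp only [stepA_eq_stepB]
  rw [PySem.List.foldl_pyRange_zero_pyGetD]
  rw [← List.sum_eq_foldl]
  split <;> simp_all
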